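-- pv_equiv track=rewrite | github.com/zoskar/Binary_search | Rookie Mistake.py | solve
-- ===== SOURCE A (Python) =====
-- def solve(s):
--     flag = 1
--     for el in s:
--         if el == 'B':
--             flag = 0
--         if el == 'R' and flag == 1:
--             return True
--         if el == 'R':
--             flag = 1
--     if flag == 1:
--         return True
--     return False
-- ===== SOURCE B (Python) =====
-- def solve(s):
--     # True iff some 'R'-delimited segment of s contains no 'B'
--     return any('B' not in piece for piece in s.split('R'))
-- ===== Notes on version B (the rewrite author's own statement) =====
-- stated objective: simpler
-- what changed: Replaced the single-pass flag state machine (early return inside a for loop) by a one-liner that splits the string on 'R' and checks whether any segment lacks a 'B'.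
import Mathlib
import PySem

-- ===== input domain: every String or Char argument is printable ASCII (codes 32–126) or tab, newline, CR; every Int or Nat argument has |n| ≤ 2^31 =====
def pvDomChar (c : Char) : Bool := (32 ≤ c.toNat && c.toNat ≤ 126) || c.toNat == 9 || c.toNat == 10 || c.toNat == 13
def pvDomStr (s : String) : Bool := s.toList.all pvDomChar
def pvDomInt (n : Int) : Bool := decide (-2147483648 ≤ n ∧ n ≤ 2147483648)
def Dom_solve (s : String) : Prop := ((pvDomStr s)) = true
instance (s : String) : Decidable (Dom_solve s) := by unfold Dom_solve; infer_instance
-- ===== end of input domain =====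

-- B replaces A's single-pass flag state machine by splitting on 'R' and scanning each
-- segment for 'B' (objective: simpler). Equal return value on every string.

-- ===== PORT A =====
-- the for-loop with early return, flag : Int as in the Python
def solveLoopA : List Char → Int → Bool
  | [], flag => flag == 1
  | c :: rest, flag =>
    let flag1 : Int := if c = 'B' then 0 else flag
    if c = 'R' ∧ flag1 = 1 then true
    else solveLoopA rest (if c = 'R' then 1 else flag1)

def solve (s : String) : Bool := solveLoopA s.toList 1

-- ===== PORT B =====
-- any('B' not in piece for piece in s.split('R'))
def solve_alt (s : String) : Bool :=
  (PySem.Chars.splitOn s.toList ['R']).any (fun piece => ! PySem.Chars.isIn ['B'] piece)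

-- ===== PRECONDITION & SPEC =====
def Spec_solve (s : String) (out : Bool) : Prop := out = solve_alt s
instance (s : String) (out : Bool) : Decidable (Spec_solve s out) := by unfold Spec_solve; infer_instance

-- ===== CLAIM (what is proved, stated in full; the proofs are below) =====
def Claim_equal_solve : Prop := ∀ (s : String), Dom_solve s → Spec_solve s (solve s)

-- ===== LEMMAS AND PROOFS =====

-- structural characterisation of splitOn on a single-char separator
def mySplit : List Char → List Char → List (List Char)
  | [], cur => [cur.reverse]
  | c :: rest, cur => if c = 'R' then cur.reverse :: mySplit rest [] else mySplit rest (c :: cur)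

lemma go_spec (fuel : Nat) : ∀ (l cur : List Char) (acc : List (List Char)),
    l.length < fuel →
    PySem.Chars.splitOn.go ['R'] fuel l cur acc = acc.reverse ++ mySplit l cur := by
  induction fuel with
  | zero => intro l cur acc h; omega
  | succ n ih =>
    intro l cur acc h
    cases l with
    | nil => simp [PySem.Chars.splitOn.go, mySplit]
    | cons c rest =>
      by_cases hc : c = 'R'
      · subst hc
        have hpre : List.isPrefixOf ['R'] ('R' :: rest) = true := by
          simp [List.isPrefixOf]
        simp only [PySem.Chars.splitOn.go, hpre, if_pos]
        rw [show List.drop (['R'] : List Char).length ('R' :: rest) = rest from rfl]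
        rw [ih rest [] (cur.reverse :: acc) (by simpa using Nat.lt_of_succ_lt_succ h)]
        simp [mySplit]
      · have hpre : List.isPrefixOf ['R'] (c :: rest) = false := by
          simp only [List.isPrefixOf, Bool.and_eq_false_iff, beq_eq_false_iff_ne, ne_eq]
          exact Or.inl (fun h => hc h.symm)
        simp only [PySem.Chars.splitOn.go, hpre, Bool.false_eq_true, if_neg, not_false_iff]
        rw [ih rest (c :: cur) acc (by simpa using Nat.lt_of_succ_lt_succ h)]
        simp [mySplit, hc]

lemma splitOn_eq_mySplit (l : List Char) :
    PySem.Chars.splitOn l ['R'] = mySplit l [] := by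
  have := go_spec (l.length + 1) l [] [] (by omega)
  simpa [PySem.Chars.splitOn] using this

lemma isIn_singleton (b : Char) (p : List Char) :
    PySem.Chars.isIn [b] p = p.contains b := by
  by_cases h : b ∈ p
  · have h1 : PySem.Chars.isIn [b] p = true :=
      (PySem.Chars.isIn_iff_infix [b] p).mpr ((List.singleton_infix_iff b p).mpr h)
    rw [h1]
    exact (List.contains_iff_mem.mpr h).symm
  · have h1 : PySem.Chars.isIn [b] p = false := by
      cases hq : PySem.Chars.isIn [b] p
      · rfl
      · exact absurd ((List.singleton_infix_iff b p).mp
          ((PySem.Chars.isIn_iff_infix [b] p).mp hq)) h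
    rw [h1]
    cases hx : p.contains 'B'
    all_goals cases hy : p.contains b
    · rfl
    · exact absurd (List.contains_iff_mem.mp hy) h
    · rfl
    · exact absurd (List.contains_iff_mem.mp hy) h

-- the loop invariant: flag says "the (reversed) current segment cur is B-free"
lemma main_inv : ∀ (l cur : List Char) (flag : Int),
    (flag = 1 ∨ flag = 0) →
    (flag = 1 ↔ cur.contains 'B' = false) →
    solveLoopA l flag = (mySplit l cur).any (fun p => ! p.contains 'B') := by
  intro l
  induction l with
  | nil =>
    intro cur flag h01 hiff
    rcases h01 with h | h <;> subst h
    · have hc := hiff.mp rfl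
      simp only [solveLoopA, mySplit, List.any_cons, List.any_nil, Bool.or_false,
        List.contains_reverse, hc]
      rfl
    · have hc : cur.contains 'B' = true := by
        cases hx : cur.contains 'B'
        · exact absurd (hiff.mpr hx) (by norm_num)
        · rfl
      simp only [solveLoopA, mySplit, List.any_cons, List.any_nil, Bool.or_false,
        List.contains_reverse, hc]
      rfl
  | cons c rest ih =>
    intro cur flag h01 hiff
    by_cases hc : c = 'R'
    · subst hc
      rcases h01 with h | h <;> subst h
      · have hcur := hiff.mp rfl
        have hA : solveLoopA ('R' :: rest) 1 = true := by simp [solveLoopA]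
        rw [hA, show mySplit ('R' :: rest) cur = cur.reverse :: mySplit rest [] from by
          simp [mySplit]]
        simp only [List.any_cons, List.contains_reverse, hcur, Bool.not_false, Bool.true_or]
      · have hcur : cur.contains 'B' = true := by
          cases hx : cur.contains 'B'
          · exact absurd (hiff.mpr hx) (by norm_num)
          · rfl
        have hA : solveLoopA ('R' :: rest) 0 = solveLoopA rest 1 := by
          simp [solveLoopA]
        rw [hA, ih [] 1 (Or.inl rfl) (by simp),
          show mySplit ('R' :: rest) cur = cur.reverse :: mySplit rest [] from by
            simp [mySplit]]
        simp only [List.any_cons, List.contains_reverse, hcur, Bool.not_true, Bool.false_or]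
    · by_cases hb : c = 'B'
      · subst hb
        have hA : solveLoopA ('B' :: rest) flag = solveLoopA rest 0 := by
          simp [solveLoopA]
        have hS : mySplit ('B' :: rest) cur = mySplit rest ('B' :: cur) := by
          simp [mySplit]
        rw [hA, hS]
        exact ih ('B' :: cur) 0 (Or.inr rfl) (by simp)
      · have hRc : ¬ (c = 'R' ∧ flag = 1) := fun h => hc h.1
        have hA : solveLoopA (c :: rest) flag = solveLoopA rest flag := by
          simp only [solveLoopA, if_neg hb, if_neg hRc, if_neg hc]
        have hS : mySplit (c :: rest) cur = mySplit rest (c :: cur) := by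
          simp [mySplit, hc]
        have hbc : (('B' : Char) == c) = false := by
          simp only [beq_eq_false_iff_ne, ne_eq]
          exact fun h => hb h.symm
        have hcontains : (c :: cur).contains 'B' = cur.contains 'B' := by
          simp only [List.contains_cons, hbc, Bool.false_or]
        rw [hA, hS]
        exact ih (c :: cur) flag h01 (hcontains ▸ hiff)

-- ===== VERDICT (by name: the statement is the Claim_ definition above) =====
theorem solve_spec : Claim_equal_solve := by
  intro s _
  unfold Spec_solve solve solve_alt
  rw [splitOn_eq_mySplit, main_inv s.toList [] 1 (Or.inl rfl) (by simp)]
  exact List.any_congr rfl (fun p => by rw [isIn_singleton])
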